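-- pv_equiv track=rewrite | github.com/FelixAker/NLP-BabyLM-Team-2 | scripts/train_morphology_tokenizer.py | split_morphologically
-- ===== SOURCE A (Python) =====
-- PREFIXES = [
--     'un', 're', 'in', 'dis', 'en', 'non', 'pre', 'de', 'mis', 'over',
--     'under', 'out', 'sub', 'inter', 'fore', 'anti', 'mid', 'super'
-- ]
--
-- SUFFIXES = [
--     'ed', 'ing', 'ly', 'er', 'est', 'ness', 'ment', 'ful', 'less',
--     'tion', 'sion', 'able', 'ible', 'al', 'ial', 'y', 'ous', 'ious',
--     'ive', 'ize', 'ise', 'en', 'ate', 'ify', 'hood', 'ship', 'dom'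
-- ]
--
-- INFLECTIONS = ['s', 'es', 'ed', 'ing', 'er', 'est']
--
-- def split_morphologically(word):
--     """
--     Split a word into morphological components.
--     Returns list of morphemes.
--     """
--     if len(word) <= 3:
--         return [word]
--
--     parts = []
--     remaining = word.lower()
--
--     # Check for prefix
--     for prefix in sorted(PREFIXES, key=len, reverse=True):
--         if remaining.startswith(prefix) and len(remaining) > len(prefix) + 2:
--             parts.append(prefix + '@@')  # @@ marks morpheme boundary
--             remaining = remaining[len(prefix):]
--             break
--
--     # Check for suffix
--     suffix_found = None
--     for suffix in sorted(SUFFIXES + INFLECTIONS, key=len, reverse=True):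
--         if remaining.endswith(suffix) and len(remaining) > len(suffix) + 2:
--             suffix_found = '@@' + suffix
--             remaining = remaining[:-len(suffix)]
--             break
--
--     # Add root
--     if remaining:
--         parts.append(remaining)
--
--     # Add suffix if found
--     if suffix_found:
--         parts.append(suffix_found)
--
--     return parts if parts else [word]
-- ===== SOURCE B (Python) =====
-- PREFIXES = [
--     'un', 're', 'in', 'dis', 'en', 'non', 'pre', 'de', 'mis', 'over',
--     'under', 'out', 'sub', 'inter', 'fore', 'anti', 'mid', 'super'
-- ]
--
-- SUFFIXES = [
--     'ed', 'ing', 'ly', 'er', 'est', 'ness', 'ment', 'ful', 'less',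
--     'tion', 'sion', 'able', 'ible', 'al', 'ial', 'y', 'ous', 'ious',
--     'ive', 'ize', 'ise', 'en', 'ate', 'ify', 'hood', 'ship', 'dom'
-- ]
--
-- INFLECTIONS = ['s', 'es', 'ed', 'ing', 'er', 'est']
--
-- PREFIX_SET = set(PREFIXES)
-- MAX_PREFIX_LEN = max(map(len, PREFIXES))
-- SUFFIX_SET = set(SUFFIXES + INFLECTIONS)
-- MAX_SUFFIX_LEN = max(map(len, SUFFIXES + INFLECTIONS))
--
--
-- def split_morphologically(word):
--     """Split a word into morphological components (set lookup by descending
--     affix length instead of scanning a sorted affix list)."""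
--     if len(word) <= 3:
--         return [word]
--     remaining = word.lower()
--     parts = []
--     for L in range(min(MAX_PREFIX_LEN, len(remaining) - 3), 0, -1):
--         if remaining[:L] in PREFIX_SET:
--             parts.append(remaining[:L] + '@@')
--             remaining = remaining[L:]
--             break
--     suffix_found = None
--     for L in range(min(MAX_SUFFIX_LEN, len(remaining) - 3), 0, -1):
--         if remaining[-L:] in SUFFIX_SET:
--             suffix_found = '@@' + remaining[-L:]
--             remaining = remaining[:-L]
--             break
--     parts.append(remaining)
--     if suffix_found:
--         parts.append(suffix_found)
--     return parts
-- ===== Notes on version B (the rewrite author's own statement) =====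
-- stated objective: idiomatic
-- what changed: B drops the per-call sorting and first-match scan over the affix lists and instead, for each possible affix length in descending order, tests the word's own prefix/suffix slice for membership in a precomputed set of PREFIXES resp. SUFFIXES+INFLECTIONS.
import Mathlib
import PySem

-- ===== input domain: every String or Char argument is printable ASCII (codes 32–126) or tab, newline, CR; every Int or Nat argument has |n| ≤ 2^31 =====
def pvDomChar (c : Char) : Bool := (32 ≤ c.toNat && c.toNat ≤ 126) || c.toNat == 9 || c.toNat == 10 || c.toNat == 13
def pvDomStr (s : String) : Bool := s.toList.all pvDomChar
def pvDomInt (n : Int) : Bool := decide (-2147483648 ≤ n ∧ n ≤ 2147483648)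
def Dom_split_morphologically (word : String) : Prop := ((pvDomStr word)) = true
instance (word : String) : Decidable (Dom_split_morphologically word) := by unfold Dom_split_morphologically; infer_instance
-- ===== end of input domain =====

-- B replaces A's two first-match scans over length-sorted affix lists by a
-- descending-length set lookup on the word's own prefix/suffix slices
-- (alternative decomposition, same observable results).

-- ===== PORT A =====
def pvPREFIXES : List (List Char) :=
  ["un".toList, "re".toList, "in".toList, "dis".toList, "en".toList, "non".toList,
   "pre".toList, "de".toList, "mis".toList, "over".toList, "under".toList, "out".toList,
   "sub".toList, "inter".toList, "fore".toList, "anti".toList, "mid".toList, "super".toList]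

def pvSUFFIXES : List (List Char) :=
  ["ed".toList, "ing".toList, "ly".toList, "er".toList, "est".toList, "ness".toList,
   "ment".toList, "ful".toList, "less".toList, "tion".toList, "sion".toList, "able".toList,
   "ible".toList, "al".toList, "ial".toList, "y".toList, "ous".toList, "ious".toList,
   "ive".toList, "ize".toList, "ise".toList, "en".toList, "ate".toList, "ify".toList,
   "hood".toList, "ship".toList, "dom".toList]

def pvINFLECTIONS : List (List Char) :=
  ["s".toList, "es".toList, "ed".toList, "ing".toList, "er".toList, "est".toList]

-- `len(remaining) > len(affix) + 2` is ported with the instance-free Bool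
-- comparison Nat.blt (same value as the Python comparison).
def split_morphologically (word : String) : List String :=
  if PySem.Str.len word ≤ 3 then [word]
  else
    let remaining0 := PySem.Chars.lower word.toList
    -- for prefix in sorted(PREFIXES, key=len, reverse=True): … break
    let (parts1, remaining1) :=
      match List.find? (fun p => PySem.Chars.startswith remaining0 p
                          && Nat.blt (p.length + 2) remaining0.length)
              (PySem.List.sorted pvPREFIXES (fun p => p.length) true) with
      | some p => ([String.ofList (p ++ "@@".toList)],
                   PySem.List.slice remaining0 (some (p.length : Int)) none)
      | none => ([], remaining0)
    -- for suffix in sorted(SUFFIXES + INFLECTIONS, key=len, reverse=True): … break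
    let (suffixFound, remaining2) :=
      match List.find? (fun s => PySem.Chars.endswith remaining1 s
                          && Nat.blt (s.length + 2) remaining1.length)
              (PySem.List.sorted (pvSUFFIXES ++ pvINFLECTIONS) (fun s => s.length) true) with
      | some s => (some (String.ofList ("@@".toList ++ s)),
                   PySem.List.slice remaining1 none (some (-(s.length : Int))))
      | none => (none, remaining1)
    -- if remaining: parts.append(remaining)   (Python truthiness = nonempty)
    let parts2 := if remaining2.isEmpty then parts1 else parts1 ++ [String.ofList remaining2]
    let parts3 := match suffixFound with
      | some sf => parts2 ++ [sf]
      | none => parts2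
    -- return parts if parts else [word]
    if parts3.isEmpty then [word] else parts3

-- ===== PORT B =====
def pvPrefixSet : PySem.Set (List Char) := PySem.Set.ofList pvPREFIXES
def pvMaxPrefixLen : Nat := ((pvPREFIXES.map (fun p => p.length)).max?).getD 0
def pvSuffixSet : PySem.Set (List Char) := PySem.Set.ofList (pvSUFFIXES ++ pvINFLECTIONS)
def pvMaxSuffixLen : Nat := (((pvSUFFIXES ++ pvINFLECTIONS).map (fun p => p.length)).max?).getD 0

-- for L in range(m, 0, -1): if memb(slice at L): … break  — first (largest) hit
def pvScanLen (memb : List Char → Bool) (g : Nat → List Char) : Nat → Option Nat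
  | 0 => none
  | Nat.succ m => if memb (g (m + 1)) then some (m + 1) else pvScanLen memb g m

def split_morphologically_alt (word : String) : List String :=
  if PySem.Str.len word ≤ 3 then [word]
  else
    let rem0 := PySem.Chars.lower word.toList
    let (parts1, rem1) :=
      match pvScanLen (fun t => PySem.Set.contains pvPrefixSet t)
              (fun L => PySem.List.slice rem0 none (some (L : Int)))
              (min pvMaxPrefixLen (rem0.length - 3)) with
      | some L => ([String.ofList (PySem.List.slice rem0 none (some (L : Int)) ++ "@@".toList)],
                   PySem.List.slice rem0 (some (L : Int)) none)
      | none => ([], rem0)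
    let (suffixFound, rem2) :=
      match pvScanLen (fun t => PySem.Set.contains pvSuffixSet t)
              (fun L => PySem.List.slice rem1 (some (-(L : Int))) none)
              (min pvMaxSuffixLen (rem1.length - 3)) with
      | some L => (some (String.ofList ("@@".toList ++ PySem.List.slice rem1 (some (-(L : Int))) none)),
                   PySem.List.slice rem1 none (some (-(L : Int))))
      | none => (none, rem1)
    let parts2 := parts1 ++ [String.ofList rem2]
    match suffixFound with
    | some sf => parts2 ++ [sf]
    | none => parts2

-- ===== PRECONDITION & SPEC =====
def Spec_split_morphologically (word : String) (out : List String) : Prop := out = split_morphologically_alt word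
instance (word : String) (out : List String) : Decidable (Spec_split_morphologically word out) := by unfold Spec_split_morphologically; infer_instance

-- ===== CLAIM (what is proved, stated in full; the proofs are below) =====
def Claim_equal_split_morphologically : Prop := ∀ (word : String), Dom_split_morphologically word → Spec_split_morphologically word (split_morphologically word)

-- ===== LEMMAS AND PROOFS =====

theorem pvScanLen_some {memb : List Char → Bool} {g : Nat → List Char} {m L : Nat}
    (h : pvScanLen memb g m = some L) :
    1 ≤ L ∧ L ≤ m ∧ memb (g L) = true ∧ ∀ L', L < L' → L' ≤ m → memb (g L') = false := by
  induction m with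
  | zero => simp [pvScanLen] at h
  | succ m ih =>
    rw [pvScanLen] at h
    by_cases hm : memb (g (m + 1)) = true
    · simp [hm] at h
      subst h
      exact ⟨by omega, le_refl _, hm, fun L' hx1 hx2 => absurd hx1 (by omega)⟩
    · simp [hm] at h
      obtain ⟨h1, h2, h3, h4⟩ := ih h
      refine ⟨h1, by omega, h3, fun L' hL1 hL2 => ?_⟩
      by_cases hL' : L' = m + 1
      · subst hL'; simpa using hm
      · exact h4 L' hL1 (by omega)

theorem pvScanLen_none {memb : List Char → Bool} {g : Nat → List Char} {m : Nat}
    (h : pvScanLen memb g m = none) :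
    ∀ L, 1 ≤ L → L ≤ m → memb (g L) = false := by
  induction m with
  | zero => intro L h1 h2; omega
  | succ m ih =>
    rw [pvScanLen] at h
    by_cases hm : memb (g (m + 1)) = true
    · simp [hm] at h
    · simp [hm] at h
      intro L h1 h2
      by_cases hL : L = m + 1
      · subst hL; simpa using hm
      · exact ih h L h1 (by omega)

theorem pvScanLen_congr {memb : List Char → Bool} {g g' : Nat → List Char} {m : Nat}
    (h : ∀ L, 1 ≤ L → L ≤ m → g L = g' L) :
    pvScanLen memb g m = pvScanLen memb g' m := by
  induction m with
  | zero => rfl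
  | succ m ih =>
    rw [pvScanLen, pvScanLen, h (m + 1) (by omega) (le_refl _),
      ih (fun L h1 h2 => h L h1 (by omega))]

theorem pvFind_first_longest {ps : List (List Char)} {pred : List Char → Bool} {p : List Char}
    (hsort : ps.Pairwise (fun a b => b.length ≤ a.length))
    (hp : p ∈ ps) (hpred : pred p = true)
    (hmax : ∀ q ∈ ps, pred q = true → q.length ≤ p.length)
    (huniq : ∀ q ∈ ps, pred q = true → q.length = p.length → q = p) :
    List.find? pred ps = some p := by
  induction ps with
  | nil => cases hp
  | cons h t ih =>
    rw [List.pairwise_cons] at hsort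
    by_cases hpredh : pred h = true
    · have h1 : h.length ≤ p.length := hmax h (by simp) hpredh
      have h2 : p.length ≤ h.length := by
        rcases List.mem_cons.mp hp with rfl | hpt
        · exact le_refl _
        · exact hsort.1 p hpt
      have heq : h = p := huniq h (by simp) hpredh (le_antisymm h1 h2)
      subst heq
      simp [List.find?, hpred]
    · have hpt : p ∈ t := by
        rcases List.mem_cons.mp hp with rfl | hpt
        · exact absurd hpred hpredh
        · exact hpt
      simp only [List.find?, Bool.of_not_eq_true hpredh]
      exact ih hsort.2 hpt (fun q hq => hmax q (by simp [hq]))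
        (fun q hq => huniq q (by simp [hq]))

-- A's first-match scan over the length-sorted candidate list equals B's
-- descending-length membership scan, mapped through the slicing function g.
theorem pvFind_eq_scan (ps : List (List Char)) (memb P : List Char → Bool)
    (g : Nat → List Char) (n k : Nat)
    (hsort : ps.Pairwise (fun a b => b.length ≤ a.length))
    (hmemb : ∀ t, memb t = true ↔ t ∈ ps)
    (hk : ∀ p ∈ ps, 1 ≤ p.length ∧ p.length ≤ k)
    (hP : ∀ p ∈ ps, (P p = true ↔ p = g p.length))
    (hg : ∀ L, L ≤ n → (g L).length = L) :
    List.find? (fun p => P p && Nat.blt (p.length + 2) n) ps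
      = (pvScanLen memb g (min k (n - 3))).map g := by
  cases hscan : pvScanLen memb g (min k (n - 3)) with
  | none =>
    have hnone := pvScanLen_none hscan
    rw [Option.map_none]
    rw [List.find?_eq_none]
    intro q hq hcontra
    simp only [Bool.and_eq_true, Nat.blt_eq] at hcontra
    obtain ⟨hq1, hq2⟩ := hk q hq
    have hqlen : q.length ≤ min k (n - 3) := by omega
    have : memb (g q.length) = false := hnone q.length hq1 hqlen
    rw [(hP q hq).mp hcontra.1] at hq
    rw [(hmemb (g q.length)).symm] at hq
    simp [hq] at this
  | some L =>
    obtain ⟨h1, h2, h3, h4⟩ := pvScanLen_some hscan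
    have hLn : L + 3 ≤ n := by omega
    have hgL : (g L).length = L := hg L (by omega)
    have hmem : g L ∈ ps := (hmemb (g L)).mp h3
    rw [Option.map_some]
    apply pvFind_first_longest hsort hmem
    · simp only [Bool.and_eq_true, Nat.blt_eq]
      refine ⟨(hP (g L) hmem).mpr (by rw [hgL]), ?_⟩
      rw [hgL]
      omega
    · intro q hq hcq
      simp only [Bool.and_eq_true, Nat.blt_eq] at hcq
      obtain ⟨hq1, hq2⟩ := hk q hq
      rw [hgL]
      by_contra hcon
      have hqlen : q.length ≤ min k (n - 3) := by omega
      have : memb (g q.length) = false := h4 q.length (by omega) hqlen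
      rw [(hP q hq).mp hcq.1] at hq
      rw [(hmemb (g q.length)).symm] at hq
      simp [hq] at this
    · intro q hq hcq hql
      simp only [Bool.and_eq_true, Nat.blt_eq] at hcq
      rw [(hP q hq).mp hcq.1, hql, hgL]

-- ===== VERDICT (by name: the statement is the Claim_ definition above) =====
set_option maxRecDepth 8192 in
theorem split_morphologically_spec : Claim_equal_split_morphologically := by
  intro word _
  unfold Spec_split_morphologically
  by_cases hlen : PySem.Str.len word ≤ 3
  · simp only [split_morphologically, split_morphologically_alt, if_pos hlen]
  · simp only [split_morphologically, split_morphologically_alt, if_neg hlen]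
    rw [PySem.Str.len_eq] at hlen
    have hlow : (PySem.Chars.lower word.toList).length = word.toList.length := by
      simp [PySem.Chars.lower]
    set rem0 := PySem.Chars.lower word.toList with hrem0def
    have hn0 : 4 ≤ rem0.length := by omega
    have hpre : List.find? (fun p => PySem.Chars.startswith rem0 p
          && Nat.blt (p.length + 2) rem0.length)
        (PySem.List.sorted pvPREFIXES (fun p => p.length) true)
      = (pvScanLen (fun t => PySem.Set.contains pvPrefixSet t) (fun L => rem0.take L)
          (min pvMaxPrefixLen (rem0.length - 3))).map (fun L => rem0.take L) := by
      apply pvFind_eq_scan _ _ _ _ rem0.length pvMaxPrefixLen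
        (PySem.List.sorted_pairwise_rev _ _)
      · intro t
        rw [PySem.Set.contains_iff]
        simp [pvPrefixSet, PySem.Set.mem_ofList, PySem.List.mem_sorted]
      · have hh : ∀ p ∈ pvPREFIXES, 1 ≤ p.length ∧ p.length ≤ pvMaxPrefixLen := by decide
        intro p hp
        exact hh p ((PySem.List.mem_sorted _ _ _ _).mp hp)
      · intro p _
        rw [PySem.Chars.startswith_iff, List.prefix_iff_eq_take]
      · intro L hL
        rw [List.length_take]
        omega
    have hcongP : pvScanLen (fun t => PySem.Set.contains pvPrefixSet t)
        (fun L => PySem.List.slice rem0 none (some (L : Int)))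
        (min pvMaxPrefixLen (rem0.length - 3))
      = pvScanLen (fun t => PySem.Set.contains pvPrefixSet t) (fun L => rem0.take L)
        (min pvMaxPrefixLen (rem0.length - 3)) :=
      pvScanLen_congr (fun L _ _ => PySem.List.slice_to_natCast rem0 L)
    rw [hpre, hcongP]
    cases hsc : pvScanLen (fun t => PySem.Set.contains pvPrefixSet t) (fun L => rem0.take L)
        (min pvMaxPrefixLen (rem0.length - 3)) with
    | none =>
      dsimp only [Option.map_none]
      have hr1 : 3 ≤ rem0.length := by omega
      have hsuf : List.find? (fun s => PySem.Chars.endswith rem0 s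
            && Nat.blt (s.length + 2) rem0.length)
          (PySem.List.sorted (pvSUFFIXES ++ pvINFLECTIONS) (fun s => s.length) true)
        = (pvScanLen (fun t => PySem.Set.contains pvSuffixSet t)
            (fun K => rem0.drop (rem0.length - K))
            (min pvMaxSuffixLen (rem0.length - 3))).map (fun K => rem0.drop (rem0.length - K)) := by
        apply pvFind_eq_scan _ _ _ _ rem0.length pvMaxSuffixLen
          (PySem.List.sorted_pairwise_rev _ _)
        · intro t
          rw [PySem.Set.contains_iff]
          simp [pvSuffixSet, PySem.Set.mem_ofList, PySem.List.mem_sorted]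
        · have hh : ∀ p ∈ pvSUFFIXES ++ pvINFLECTIONS,
              1 ≤ p.length ∧ p.length ≤ pvMaxSuffixLen := by decide
          intro p hp
          exact hh p ((PySem.List.mem_sorted _ _ _ _).mp hp)
        · intro p _
          rw [PySem.Chars.endswith_iff, List.suffix_iff_eq_drop]
        · intro L hL
          rw [List.length_drop]
          omega
      have hcongS : pvScanLen (fun t => PySem.Set.contains pvSuffixSet t)
          (fun K => PySem.List.slice rem0 (some (-(K : Int))) none)
          (min pvMaxSuffixLen (rem0.length - 3))
        = pvScanLen (fun t => PySem.Set.contains pvSuffixSet t)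
            (fun K => rem0.drop (rem0.length - K)) (min pvMaxSuffixLen (rem0.length - 3)) :=
        pvScanLen_congr (fun K h1 _ => PySem.List.slice_from_neg_natCast rem0 K h1)
      simp only [hsuf, hcongS]
      cases hsc2 : pvScanLen (fun t => PySem.Set.contains pvSuffixSet t)
          (fun K => rem0.drop (rem0.length - K)) (min pvMaxSuffixLen (rem0.length - 3)) with
      | none =>
        dsimp only [Option.map_none]
        have hne : rem0.isEmpty = false := by
          rw [List.isEmpty_eq_false_iff]
          intro h
          rw [h] at hr1
          simp at hr1
        simp [hne]
      | some M =>
        obtain ⟨hb1, hb2, _, _⟩ := pvScanLen_some hsc2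
        have hbM : M ≤ rem0.length - 3 := le_trans hb2 (min_le_right _ _)
        have hsl : (rem0.drop (rem0.length - M)).length = M := by
          rw [List.length_drop]
          omega
        dsimp only [Option.map_some]
        simp only [hsl, PySem.List.slice_to_neg_natCast rem0 M (by omega),
          PySem.List.slice_from_neg_natCast rem0 M (by omega)]
        have htl : (rem0.take (rem0.length - M)).length = rem0.length - M := by
          rw [List.length_take]
          omega
        have hne2 : (rem0.take (rem0.length - M)).isEmpty = false := by
          rw [List.isEmpty_eq_false_iff]
          intro h
          rw [h] at htl
          simp only [List.length_nil] at htl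
          omega
        simp [hne2]
    | some L =>
      obtain ⟨ha1, ha2, _, _⟩ := pvScanLen_some hsc
      have haL : L ≤ rem0.length - 3 := le_trans ha2 (min_le_right _ _)
      have htk : (rem0.take L).length = L := by
        rw [List.length_take]
        omega
      dsimp only [Option.map_some]
      simp only [htk, PySem.List.slice_to_natCast, PySem.List.slice_from_natCast]
      have hr1 : 3 ≤ (rem0.drop L).length := by
        rw [List.length_drop]
        omega
      have hsuf : List.find? (fun s => PySem.Chars.endswith (rem0.drop L) s
            && Nat.blt (s.length + 2) (rem0.drop L).length)
          (PySem.List.sorted (pvSUFFIXES ++ pvINFLECTIONS) (fun s => s.length) true)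
        = (pvScanLen (fun t => PySem.Set.contains pvSuffixSet t)
            (fun K => (rem0.drop L).drop ((rem0.drop L).length - K))
            (min pvMaxSuffixLen ((rem0.drop L).length - 3))).map (fun K => (rem0.drop L).drop ((rem0.drop L).length - K)) := by
        apply pvFind_eq_scan _ _ _ _ (rem0.drop L).length pvMaxSuffixLen
          (PySem.List.sorted_pairwise_rev _ _)
        · intro t
          rw [PySem.Set.contains_iff]
          simp [pvSuffixSet, PySem.Set.mem_ofList, PySem.List.mem_sorted]
        · have hh : ∀ p ∈ pvSUFFIXES ++ pvINFLECTIONS,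
              1 ≤ p.length ∧ p.length ≤ pvMaxSuffixLen := by decide
          intro p hp
          exact hh p ((PySem.List.mem_sorted _ _ _ _).mp hp)
        · intro p _
          rw [PySem.Chars.endswith_iff, List.suffix_iff_eq_drop]
        · intro L hL
          rw [List.length_drop]
          omega
      have hcongS : pvScanLen (fun t => PySem.Set.contains pvSuffixSet t)
          (fun K => PySem.List.slice (rem0.drop L) (some (-(K : Int))) none)
          (min pvMaxSuffixLen ((rem0.drop L).length - 3))
        = pvScanLen (fun t => PySem.Set.contains pvSuffixSet t)
            (fun K => (rem0.drop L).drop ((rem0.drop L).length - K)) (min pvMaxSuffixLen ((rem0.drop L).length - 3)) :=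
        pvScanLen_congr (fun K h1 _ => PySem.List.slice_from_neg_natCast (rem0.drop L) K h1)
      simp only [hsuf, hcongS]
      cases hsc2 : pvScanLen (fun t => PySem.Set.contains pvSuffixSet t)
          (fun K => (rem0.drop L).drop ((rem0.drop L).length - K)) (min pvMaxSuffixLen ((rem0.drop L).length - 3)) with
      | none =>
        dsimp only [Option.map_none]
        have hne : (rem0.drop L).isEmpty = false := by
          rw [List.isEmpty_eq_false_iff]
          intro h
          rw [h] at hr1
          simp at hr1
        simp [hne]
      | some M =>
        obtain ⟨hb1, hb2, _, _⟩ := pvScanLen_some hsc2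
        have hbM : M ≤ (rem0.drop L).length - 3 := le_trans hb2 (min_le_right _ _)
        have hsl : ((rem0.drop L).drop ((rem0.drop L).length - M)).length = M := by
          rw [List.length_drop]
          omega
        dsimp only [Option.map_some]
        simp only [hsl, PySem.List.slice_to_neg_natCast (rem0.drop L) M (by omega),
          PySem.List.slice_from_neg_natCast (rem0.drop L) M (by omega)]
        rw [List.length_drop] at hbM
        have hcond : ¬(rem0.length - L - M = 0 ∨ rem0.length ≤ L) := by omega
        simp [hcond]
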